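-- pv_equiv track=rewrite | github.com/zfoxbaby/stil-dev | gpt_tests/htol/TimingFormatter.py | format_channels
-- ===== SOURCE A (Python) =====
-- from typing import Dict, List, Optional, Set, Tuple
--
-- def format_channels(channels: List[int]) -> str:
--     """格式化通道号列表
--
--     连续的数字使用"-"连接，如 3,4,5,6,7 -> 3-7
--     非连续的数字用逗号分隔
--     """
--     if not channels:
--         return "<>"
--
--     # 排序并去重
--     sorted_channels = sorted(set(channels))
--
--     if len(sorted_channels) == 1:
--         return f"<{sorted_channels[0]}>"
--
--     # 找出连续区间
--     ranges = []
--     start = sorted_channels[0]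
--     end = sorted_channels[0]
--
--     for i in range(1, len(sorted_channels)):
--         if sorted_channels[i] == end + 1:
--             # 连续，扩展区间
--             end = sorted_channels[i]
--         else:
--             # 不连续，保存当前区间，开始新区间
--             ranges.append((start, end))
--             start = sorted_channels[i]
--             end = sorted_channels[i]
--
--     # 保存最后一个区间
--     ranges.append((start, end))
--
--     # 格式化输出
--     parts = []
--     for start, end in ranges:
--         if start == end:
--             # 单个数字
--             parts.append(str(start))
--         elif end - start == 1:
--             # 两个连续数字，不用"-"
--             parts.append(f"{start},{end}")
--         else:
--             # 3个或以上连续数字，用"-"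
--             parts.append(f"{start}-{end}")
--
--     return "<" + ",".join(parts) + ">"
-- ===== SOURCE B (Python) =====
-- def format_channels(channels):
--     s = set(channels)
--     parts = []
--     for a in sorted(v for v in s if v - 1 not in s):
--         b = a
--         while b + 1 in s:
--             b += 1
--         if a == b:
--             parts.append(str(a))
--         elif b == a + 1:
--             parts.append(f"{a},{b}")
--         else:
--             parts.append(f"{a}-{b}")
--     return "<" + ",".join(parts) + ">"
-- ===== Notes on version B (the rewrite author's own statement) =====
-- stated objective: alternative
-- what changed: B never scans adjacent elements of a sorted list: it builds a hash set, identifies run starts as the members v with v-1 not in the set, sorts only the starts, and finds each run's end by membership probes b+1 in set (the classic 'longest consecutive sequence' technique), with no special cases for empty or singleton input.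
import Mathlib
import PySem

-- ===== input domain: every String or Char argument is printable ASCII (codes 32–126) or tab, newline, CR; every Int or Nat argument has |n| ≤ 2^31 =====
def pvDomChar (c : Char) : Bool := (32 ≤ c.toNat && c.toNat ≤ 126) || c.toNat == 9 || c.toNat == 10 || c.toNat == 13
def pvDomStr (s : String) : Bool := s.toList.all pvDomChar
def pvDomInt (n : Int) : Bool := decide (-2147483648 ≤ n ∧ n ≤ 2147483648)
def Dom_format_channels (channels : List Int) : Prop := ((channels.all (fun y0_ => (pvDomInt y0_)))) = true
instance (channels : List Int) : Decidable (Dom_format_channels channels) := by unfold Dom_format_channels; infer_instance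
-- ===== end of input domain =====

-- B replaces A's adjacent-element scan of the sorted unique list by the hash-set technique:
-- run starts are the members v with v-1 not in the set, each run's end is found by repeated
-- membership probes b+1 ∈ set; no special cases for empty or singleton input (objective: alternative).

-- ===== PORT A =====
def pvStepA (acc : List (Int × Int) × Int × Int) (v : Int) : List (Int × Int) × Int × Int :=
  if v = acc.2.2 + 1 then (acc.1, acc.2.1, v) else (acc.1 ++ [(acc.2.1, acc.2.2)], v, v)

def format_channels (channels : List Int) : String :=
  if channels = [] then "<>"
  else
    let sc := PySem.List.sorted (PySem.Set.ofList channels) (fun x => x) false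
    if sc.length = 1 then "<" ++ PySem.Int.toStr (PySem.List.pyGetD sc 0 0) ++ ">"
    else
      let h := PySem.List.pyGetD sc 0 0
      let st := (PySem.List.pyRange 1 sc.length 1).foldl
        (fun acc i => pvStepA acc (PySem.List.pyGetD sc i 0)) ([], h, h)
      let ranges := st.1 ++ [(st.2.1, st.2.2)]
      let parts := ranges.foldl (fun ps (p : Int × Int) =>
          if p.1 = p.2 then ps ++ [PySem.Int.toStr p.1]
          else if p.2 - p.1 = 1 then ps ++ [PySem.Int.toStr p.1 ++ "," ++ PySem.Int.toStr p.2]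
          else ps ++ [PySem.Int.toStr p.1 ++ "-" ++ PySem.Int.toStr p.2]) []
      "<" ++ PySem.Str.join "," parts ++ ">"

-- ===== PORT B =====
-- the 'while b + 1 in s' loop: the set is finite, so s.length probes always suffice
def pvWalk (s : List Int) : Nat → Int → Int
  | 0, b => b
  | n + 1, b => if PySem.Set.contains s (b + 1) then pvWalk s n (b + 1) else b

-- body of B's for-loop: format the run beginning at the start a
def pvFmtB (s : List Int) (a : Int) : String :=
  let b := pvWalk s s.length a
  if a = b then PySem.Int.toStr a
  else if b = a + 1 then PySem.Int.toStr a ++ "," ++ PySem.Int.toStr b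
  else PySem.Int.toStr a ++ "-" ++ PySem.Int.toStr b

def format_channels_alt (channels : List Int) : String :=
  let s := PySem.Set.ofList channels
  let starts := PySem.List.sorted (s.filter (fun v => !(PySem.Set.contains s (v - 1)))) (fun x => x) false
  "<" ++ PySem.Str.join "," (starts.map (pvFmtB s)) ++ ">"

-- ===== PRECONDITION & SPEC =====
def Spec_format_channels (channels : List Int) (out : String) : Prop := out = format_channels_alt channels
instance (channels : List Int) (out : String) : Decidable (Spec_format_channels channels out) := by unfold Spec_format_channels; infer_instance

-- ===== CLAIM (what is proved, stated in full; the proofs are below) =====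
def Claim_equal_format_channels : Prop := ∀ (channels : List Int), Dom_format_channels channels → Spec_format_channels channels (format_channels channels)

-- ===== LEMMAS AND PROOFS =====

-- the tail of A's maximal run starting at b
def pvTakeRun (b : Int) : List Int → Int × List Int
  | [] => (b, [])
  | x :: xs => if x = b + 1 then pvTakeRun x xs else (b, x :: xs)

theorem pvTakeRun_len (b : Int) (xs : List Int) : (pvTakeRun b xs).2.length ≤ xs.length := by
  induction xs generalizing b with
  | nil => simp [pvTakeRun]
  | cons x xs ih =>
    simp only [pvTakeRun]
    split
    · exact le_trans (ih x) (Nat.le_succ _)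
    · simp

-- A's maximal-run decomposition, as a list of (start, end) ranges
def pvRuns : List Int → List (Int × Int)
  | [] => []
  | a :: rest =>
    let p := pvTakeRun a rest
    (a, p.1) :: pvRuns p.2
  termination_by l => l.length
  decreasing_by exact Nat.lt_succ_of_le (pvTakeRun_len a rest)

def pvFmt (p : Int × Int) : String :=
  if p.1 = p.2 then PySem.Int.toStr p.1
  else if p.2 - p.1 = 1 then PySem.Int.toStr p.1 ++ "," ++ PySem.Int.toStr p.2
  else PySem.Int.toStr p.1 ++ "-" ++ PySem.Int.toStr p.2

def pvIntRange (a b : Int) : List Int := (List.range (b + 1 - a).toNat).map (fun (i : Nat) => a + (i : Int))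

theorem pv_mem_intRange {a b x : Int} : x ∈ pvIntRange a b ↔ a ≤ x ∧ x ≤ b := by
  simp only [pvIntRange, List.mem_map, List.mem_range]
  constructor
  · rintro ⟨i, hi, rfl⟩; omega
  · rintro ⟨h1, h2⟩; exact ⟨(x - a).toNat, by omega, by omega⟩

theorem pv_intRange_cons {a b : Int} (h : a ≤ b) :
    pvIntRange a b = a :: pvIntRange (a + 1) b := by
  have hn : (b + 1 - a).toNat = (b + 1 - (a + 1)).toNat + 1 := by omega
  simp only [pvIntRange, hn, List.range_succ_eq_map, List.map_cons, List.map_map]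
  refine congrArg₂ List.cons (by simp) ?_
  apply List.map_congr_left
  intro i _
  simp only [Function.comp_apply]
  push_cast
  ring

theorem pv_intRange_single (a : Int) : pvIntRange a a = [a] := by
  simp [pvIntRange, List.range_succ]

theorem pv_intRange_nodup (a b : Int) : (pvIntRange a b).Nodup := by
  apply List.Nodup.map
  · intro i j hij
    simp only at hij
    omega
  · exact List.nodup_range

theorem pv_intRange_length (a b : Int) : (pvIntRange a b).length = (b + 1 - a).toNat := by
  simp [pvIntRange]

theorem pv_contains_false {s : List Int} {x : Int} (h : x ∉ s) : PySem.Set.contains s x = false := by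
  cases hc : PySem.Set.contains s x
  · rfl
  · exact absurd ((PySem.Set.contains_iff s x).mp hc) h

-- structure of a maximal run inside a strictly increasing list
theorem pv_takeRun_spec (rest : List Int) : ∀ (a : Int),
    (a :: rest).Pairwise (· < ·) →
    a ≤ (pvTakeRun a rest).1 ∧
    a :: rest = pvIntRange a (pvTakeRun a rest).1 ++ (pvTakeRun a rest).2 ∧
    (∀ y ∈ (pvTakeRun a rest).2, (pvTakeRun a rest).1 + 1 < y) ∧
    (pvTakeRun a rest).2.Pairwise (· < ·) := by
  induction rest with
  | nil =>
    intro a _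
    simp [pvTakeRun, pv_intRange_single]
  | cons x xs ih =>
    intro a hs
    have hxs : (x :: xs).Pairwise (· < ·) := (List.pairwise_cons.1 hs).2
    by_cases hx : x = a + 1
    · have hstep : pvTakeRun a (x :: xs) = pvTakeRun (a + 1) xs := by
        simp [pvTakeRun, hx]
      rw [hstep]
      subst hx
      obtain ⟨h1, h2, h3, h4⟩ := ih (a + 1) hxs
      refine ⟨by omega, ?_, h3, h4⟩
      rw [pv_intRange_cons (by omega), List.cons_append, ← h2]
    · have hstep : pvTakeRun a (x :: xs) = (a, x :: xs) := by
        simp [pvTakeRun, hx]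
      rw [hstep]
      have hax : a < x := (List.pairwise_cons.1 hs).1 x (by simp)
      refine ⟨le_refl a, by rw [pv_intRange_single]; rfl, ?_, hxs⟩
      intro y hy
      rcases List.mem_cons.1 hy with rfl | hy
      · omega
      · have := (List.pairwise_cons.1 hxs).1 y hy; omega

-- the while-loop reaches the run end: enough fuel, all of [a,b] in s, b+1 not in s
theorem pv_walk_eq (s : List Int) : ∀ (n : Nat) (a b : Int), a ≤ b → (b - a).toNat ≤ n →
    (∀ x, a ≤ x → x ≤ b → x ∈ s) → (b + 1) ∉ s →
    pvWalk s n a = b := by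
  intro n
  induction n with
  | zero =>
    intro a b h1 h2 _ _
    have : a = b := by omega
    simp [pvWalk, this]
  | succ n ih =>
    intro a b h1 h2 hin hout
    by_cases hab : a = b
    · subst hab
      simp only [pvWalk, pv_contains_false hout]
      simp
    · have ha1 : PySem.Set.contains s (a + 1) = true :=
        (PySem.Set.contains_iff s (a + 1)).mpr (hin (a + 1) (by omega) (by omega))
      simp only [pvWalk, ha1, if_pos]
      exact ih (a + 1) b (by omega) (by omega) (fun x hx1 hx2 => hin x (by omega) hx2) hout

-- a list containing all of [a,b] has length ≥ b - a (fuel adequacy for the walk)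
theorem pv_length_ge (s : List Int) (a b : Int)
    (hin : ∀ x, a ≤ x → x ≤ b → x ∈ s) : (b - a).toNat ≤ s.length := by
  have hsub : pvIntRange a b ⊆ s := by
    intro x hx
    obtain ⟨h1, h2⟩ := pv_mem_intRange.1 hx
    exact hin x h1 h2
  have := List.Subperm.length_le ((pv_intRange_nodup a b).subperm hsub)
  rw [pv_intRange_length] at this
  omega

-- core induction: formatting A's runs of a strictly increasing tail l of sc equals B's
-- per-start formatting of the run starts found in l, where s ≈ sc as sets and every
-- element of sc missing from l lies well below everything in l
theorem pv_core (s : List Int) (sc : List Int)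
    (hmem : ∀ x : Int, x ∈ s ↔ x ∈ sc) :
    ∀ (l : List Int), l.Pairwise (· < ·) → (∀ x ∈ l, x ∈ sc) →
    (∀ x ∈ sc, x ∈ l ∨ ∀ y ∈ l, x < y - 1) →
    (pvRuns l).map pvFmt = (l.filter (fun v => !(PySem.Set.contains s (v - 1)))).map (pvFmtB s) := by
  intro l
  induction l using pvRuns.induct with
  | case1 => intro _ _ _; simp [pvRuns]
  | case2 a rest p ihp =>
    intro hsort hsub hgap
    obtain ⟨hab, hdec, hgt, hsort'⟩ := pv_takeRun_spec rest a hsort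
    set b := (pvTakeRun a rest).1 with hb
    set r := (pvTakeRun a rest).2 with hr
    have hrange_sub : ∀ x, a ≤ x → x ≤ b → x ∈ a :: rest := by
      intro x h1 h2
      rw [hdec]
      exact List.mem_append.2 (Or.inl (pv_mem_intRange.2 ⟨h1, h2⟩))
    have hin_s : ∀ x, a ≤ x → x ≤ b → x ∈ s := by
      intro x h1 h2
      exact (hmem x).2 (hsub x (hrange_sub x h1 h2))
    have hnotin_l : (b + 1) ∉ a :: rest := by
      rw [hdec]
      intro h
      rcases List.mem_append.1 h with h | h
      · have := pv_mem_intRange.1 h; omega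
      · have := hgt _ h; omega
    have hout_s : (b + 1) ∉ s := by
      intro h
      rcases hgap _ ((hmem _).1 h) with h' | h'
      · exact hnotin_l h'
      · have := h' a (by simp); omega
    have hwalk : pvWalk s s.length a = b :=
      pv_walk_eq s s.length a b hab (pv_length_ge s a b hin_s) hin_s hout_s
    have hpa : (!(PySem.Set.contains s (a - 1))) = true := by
      have : (a - 1) ∉ s := by
        intro h
        rcases hgap _ ((hmem _).1 h) with h' | h'
        · rcases List.mem_cons.1 h' with h'' | h''
          · omega
          · have := (List.pairwise_cons.1 hsort).1 _ h''; omega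
        · have := h' a (by simp); omega
      rw [pv_contains_false this]
      rfl
    have hfilter : (a :: rest).filter (fun v => !(PySem.Set.contains s (v - 1)))
        = a :: r.filter (fun v => !(PySem.Set.contains s (v - 1))) := by
      have hnil : (pvIntRange (a + 1) b).filter (fun v => !(PySem.Set.contains s (v - 1))) = [] := by
        apply List.filter_eq_nil_iff.2
        intro x hx
        obtain ⟨h1, h2⟩ := pv_mem_intRange.1 hx
        simp only [Bool.not_eq_true', ← Bool.not_eq_true, Decidable.not_not,
          PySem.Set.contains_iff]
        exact hin_s (x - 1) (by omega) (by omega)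
      rw [hdec, pv_intRange_cons hab, List.cons_append]
      simp only [List.filter_cons, List.filter_append, hpa, hnil, List.nil_append, if_true]
    have hsub' : ∀ x ∈ r, x ∈ sc := by
      intro x hx
      exact hsub x (by rw [hdec]; exact List.mem_append.2 (Or.inr hx))
    have hgap' : ∀ x ∈ sc, x ∈ r ∨ ∀ y ∈ r, x < y - 1 := by
      intro x hx
      rcases hgap x hx with h | h
      · rw [hdec] at h
        rcases List.mem_append.1 h with h | h
        · right
          intro y hy
          have h1 := pv_mem_intRange.1 h
          have h2 := hgt y hy
          omega
        · exact Or.inl h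
      · exact Or.inr (fun y hy => h y (by rw [hdec]; exact List.mem_append.2 (Or.inr hy)))
    rw [pvRuns, hfilter, List.map_cons, List.map_cons]
    refine congrArg₂ _ ?_ (ihp hsort' hsub' hgap')
    simp only [pvFmtB, pvFmt, ← hb, hwalk]
    by_cases h1 : a = b
    · simp [h1]
    · by_cases h2 : b = a + 1
      · simp [h2]
      · simp [h1, h2, show ¬ b - a = 1 by omega]

-- A's index loop, seen as a fold over the tail, produces exactly the run decomposition
theorem pv_fold_runs (rest : List Int) : ∀ (r0 : List (Int × Int)) (s e : Int),
    (rest.foldl pvStepA (r0, s, e)).1 ++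
      [((rest.foldl pvStepA (r0, s, e)).2.1, (rest.foldl pvStepA (r0, s, e)).2.2)] =
    r0 ++ (s, (pvTakeRun e rest).1) :: pvRuns (pvTakeRun e rest).2 := by
  induction rest with
  | nil => intro r0 s e; simp [pvTakeRun, pvRuns]
  | cons x xs ih =>
    intro r0 s e
    by_cases hx : x = e + 1
    · subst hx
      simp only [List.foldl_cons, pvStepA, pvTakeRun]
      exact ih r0 s (e + 1)
    · simp only [List.foldl_cons, pvStepA, if_neg hx, pvTakeRun]
      rw [ih (r0 ++ [(s, e)]) x x, pvRuns]
      simp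

-- A's formatting loop is a map of pvFmt
theorem pv_parts_map (ranges : List (Int × Int)) : ∀ (ps : List String),
    ranges.foldl (fun ps (p : Int × Int) =>
        if p.1 = p.2 then ps ++ [PySem.Int.toStr p.1]
        else if p.2 - p.1 = 1 then ps ++ [PySem.Int.toStr p.1 ++ "," ++ PySem.Int.toStr p.2]
        else ps ++ [PySem.Int.toStr p.1 ++ "-" ++ PySem.Int.toStr p.2]) ps
      = ps ++ ranges.map pvFmt := by
  induction ranges with
  | nil => intro ps; simp
  | cons p t ih =>
    intro ps
    simp only [List.foldl_cons, List.map_cons]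
    rw [ih]
    unfold pvFmt
    split_ifs <;> simp

theorem pv_join_singleton (s : String) : PySem.Str.join "," [s] = s := by
  simp [PySem.Str.join]

-- B in terms of A's run decomposition of the sorted deduplicated list
theorem pv_alt_eq (channels : List Int) :
    format_channels_alt channels =
      "<" ++ PySem.Str.join ","
        ((pvRuns (PySem.List.sorted (PySem.Set.ofList channels) (fun x => x) false)).map pvFmt) ++ ">" := by
  have hperm := PySem.List.sorted_perm (PySem.Set.ofList channels) (fun x => x) false
  have hsort := PySem.List.sorted_ofList_pairwise_lt (κ := Int) channels
  have hmem : ∀ x : Int, x ∈ (PySem.Set.ofList channels : List Int) ↔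
      x ∈ PySem.List.sorted (PySem.Set.ofList channels) (fun x => x) false :=
    fun x => ⟨fun h => hperm.mem_iff.2 h, fun h => hperm.mem_iff.1 h⟩
  have hstarts : PySem.List.sorted
        ((PySem.Set.ofList channels).filter (fun v => !(PySem.Set.contains (PySem.Set.ofList channels) (v - 1))))
        (fun x => x) false
      = (PySem.List.sorted (PySem.Set.ofList channels) (fun x => x) false).filter
          (fun v => !(PySem.Set.contains (PySem.Set.ofList channels) (v - 1))) :=
    PySem.List.sorted_eq_of_perm_of_pairwise_lt _ _ _ (hperm.filter _) (hsort.filter _)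
  show "<" ++ PySem.Str.join ","
      ((PySem.List.sorted
        ((PySem.Set.ofList channels).filter (fun v => !(PySem.Set.contains (PySem.Set.ofList channels) (v - 1))))
        (fun x => x) false).map (pvFmtB (PySem.Set.ofList channels))) ++ ">" = _
  rw [hstarts,
    ← pv_core (PySem.Set.ofList channels) (PySem.List.sorted (PySem.Set.ofList channels) (fun x => x) false)
        hmem (PySem.List.sorted (PySem.Set.ofList channels) (fun x => x) false)
        hsort (fun _ hx => hx) (fun x hx => Or.inl hx)]

-- ===== VERDICT (by name: the statement is the Claim_ definition above) =====
theorem format_channels_spec : Claim_equal_format_channels := by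
  intro channels _
  unfold Spec_format_channels
  rw [pv_alt_eq]
  by_cases hc : channels = []
  · subst hc
    show ("<>" : String) = _
    rw [show (PySem.List.sorted (PySem.Set.ofList ([] : List Int)) (fun x => x) false) = [] from rfl]
    rw [show pvRuns [] = [] from by rw [pvRuns]]
    rfl
  · simp only [format_channels, if_neg hc]
    obtain ⟨a, rest, hl⟩ : ∃ a rest,
        PySem.List.sorted (PySem.Set.ofList channels) (fun x => x) false = a :: rest := by
      rcases h : PySem.List.sorted (PySem.Set.ofList channels) (fun x => x) false with _ | ⟨a, r⟩
      · exfalso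
        have hp := PySem.List.sorted_perm (PySem.Set.ofList channels) (fun x => x) false
        rw [h] at hp
        have h0 : PySem.Set.ofList channels = [] := List.Perm.eq_nil hp.symm
        rcases channels with _ | ⟨c, cs⟩
        · exact hc rfl
        · have hmem : c ∈ PySem.Set.ofList (c :: cs) := by
            rw [PySem.Set.mem_ofList]; simp
          rw [h0] at hmem; simp at hmem
      · exact ⟨a, r, rfl⟩
    rw [hl]
    have hget0 : PySem.List.pyGetD (a :: rest) 0 0 = a := by
      simp [PySem.List.pyGetD, PySem.List.pyGet?, PySem.List.pyIdx?]
    by_cases hrest : rest = []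
    · subst hrest
      rw [if_pos (by simp), hget0]
      have hruns : pvRuns [a] = [(a, a)] := by
        rw [pvRuns]
        simp [pvTakeRun]
        rw [pvRuns]
      rw [hruns, List.map_cons, List.map_nil]
      rw [show pvFmt (a, a) = PySem.Int.toStr a from by simp [pvFmt]]
      rw [pv_join_singleton]
    · rw [if_neg (by simpa [List.length_eq_zero_iff] using hrest), hget0]
      have hfold : (PySem.List.pyRange 1 ((a :: rest).length) 1).foldl
          (fun acc i => pvStepA acc (PySem.List.pyGetD (a :: rest) i 0)) ([], a, a)
          = rest.foldl pvStepA ([], a, a) := by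
        have := PySem.List.foldl_pyRange_pyGetD (xs := a :: rest) (a := (1 : Int)) (d := (0 : Int))
          (f := pvStepA) (init := (([], a, a) : List (Int × Int) × Int × Int)) (by norm_num)
        simpa [PySem.List.len_eq] using this
      rw [hfold]
      have hfr := pv_fold_runs rest ([] : List (Int × Int)) a a
      rw [List.nil_append] at hfr
      rw [pv_parts_map _ [], List.nil_append]
      rw [hfr]
      simp only [pvRuns]
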